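-- pv_equiv track=rewrite | github.com/mmahnken/advent-of-code-2020 | day-13/advent.py | find_one_multiple
-- ===== SOURCE A (Python) =====
-- def find_one_multiple(line, offset, first_id):
-- 	i = line
-- 	possible_answers = set()
--
-- 	while True:
-- 		if (i - offset) % first_id == 0:
-- 			possible_answers.add(i-offset)
--
-- 		i += line
--
-- 		if len(possible_answers) == 2:
-- 			s = sorted(possible_answers)
-- 			return (s[0], s[1]-s[0])
-- ===== SOURCE B (Python) =====
-- def _egcd(a, b):
--     # extended Euclid: returns (g, x, y) with a*x + b*y = g = gcd(a, b) for a, b >= 0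
--     if b == 0:
--         return (a, 1, 0)
--     g, x, y = _egcd(b, a % b)
--     return (g, y, x - (a // b) * y)
--
--
-- def find_one_multiple(line, offset, first_id):
--     m = abs(first_id)
--     a = line % m
--     b = offset % m
--     g, x, _ = _egcd(a, m)
--     period = m // g
--     k0 = ((b // g) * x) % period
--     k = k0 if k0 >= 1 else period
--     v = k * line - offset
--     lo = v if line > 0 else v + period * line
--     return (lo, period * abs(line))
-- ===== Notes on version B (the rewrite author's own statement) =====
-- stated objective: faster
-- what changed: Replaces A's unbounded scan over successive multiples of line (testing each against offset mod first_id) by solving the linear congruence k*line = offset (mod first_id) directly with extended Euclid / modular inverse, reading off the first hit and the period in closed form.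
import Mathlib
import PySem

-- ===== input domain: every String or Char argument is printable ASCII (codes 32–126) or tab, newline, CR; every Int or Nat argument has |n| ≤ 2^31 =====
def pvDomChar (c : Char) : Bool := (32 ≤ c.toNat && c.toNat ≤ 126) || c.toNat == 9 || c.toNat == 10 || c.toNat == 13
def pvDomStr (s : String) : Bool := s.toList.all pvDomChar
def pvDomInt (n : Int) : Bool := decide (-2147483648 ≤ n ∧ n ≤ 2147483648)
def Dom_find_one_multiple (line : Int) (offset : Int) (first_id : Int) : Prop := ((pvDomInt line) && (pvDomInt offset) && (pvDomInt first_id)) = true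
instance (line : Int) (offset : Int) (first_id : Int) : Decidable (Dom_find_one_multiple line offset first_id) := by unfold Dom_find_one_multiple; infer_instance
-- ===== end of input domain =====

-- B replaces A's O(first_id) brute-force scan over multiples of line by solving the linear
-- congruence k*line ≡ offset (mod first_id) with extended Euclid (O(log first_id)).


-- ===== PORT A =====
-- fuel-bounded transliteration of A's 'while True' loop (fuel only makes the recursion total:
-- on Pre_ the loop returns within 2*|first_id|+2 iterations, proved below; elsewhere the Python
-- raises or loops forever and nothing is claimed).
def findOneLoopA (line : Int) (offset : Int) (first_id : Int) : Nat → Int → PySem.Set Int → List Int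
  | 0, _, _ => []
  | fuel+1, i, possible_answers =>
    let possible_answers :=
      if PySem.Int.mod (i - offset) first_id = 0 then
        PySem.Set.add possible_answers (i - offset)
      else possible_answers
    let i := i + line
    if PySem.Set.len possible_answers = 2 then
      -- len(possible_answers) == 2 here, so s[0] and s[1] exist and pyGetD indexing is exact
      let s := PySem.List.sorted possible_answers (fun x => x)
      [PySem.List.pyGetD s 0 0, PySem.List.pyGetD s 1 0 - PySem.List.pyGetD s 0 0]
    else
      findOneLoopA line offset first_id fuel i possible_answers

def find_one_multiple (line : Int) (offset : Int) (first_id : Int) : List Int :=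
  findOneLoopA line offset first_id (2 * first_id.natAbs + 2) line PySem.Set.empty

-- ===== PORT B =====
-- extended Euclid, as in Source B's _egcd
def egcd (a : Int) (b : Int) : Int × Int × Int :=
  if b = 0 then (a, 1, 0)
  else
    let r := egcd b (PySem.Int.mod a b)
    (r.1, r.2.2, r.2.1 - PySem.Int.floordiv a b * r.2.2)
termination_by b.natAbs
decreasing_by
  rename_i hb
  rcases lt_or_gt_of_ne hb with h | h
  · have := PySem.Int.mod_neg_bounds a h
    omega
  · have h1 := PySem.Int.mod_nonneg a h
    have h2 := PySem.Int.mod_lt a h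
    omega

def find_one_multiple_alt (line : Int) (offset : Int) (first_id : Int) : List Int :=
  let m : Int := |first_id|
  let a := PySem.Int.mod line m
  let b := PySem.Int.mod offset m
  let r := egcd a m
  let g := r.1
  let x := r.2.1
  let period := PySem.Int.floordiv m g
  let k0 := PySem.Int.mod (PySem.Int.floordiv b g * x) period
  let k := if k0 ≥ 1 then k0 else period
  let v := k * line - offset
  let lo := if line > 0 then v else v + period * line
  [lo, period * |line|]

-- ===== PRECONDITION & SPEC =====
-- Pre_ is exactly where the Python A returns: for first_id = 0 A raises ZeroDivisionError, and
-- for line = 0 or gcd(line, first_id) ∤ offset the 'while True' loop never collects two values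
-- (no multiple of line is ≡ offset mod first_id twice) and A loops forever.
def Pre_find_one_multiple (line : Int) (offset : Int) (first_id : Int) : Prop :=
  line ≠ 0 ∧ first_id ≠ 0 ∧ (Int.gcd line first_id : Int) ∣ offset
instance (line : Int) (offset : Int) (first_id : Int) : Decidable (Pre_find_one_multiple line offset first_id) := by unfold Pre_find_one_multiple; infer_instance
def pvWitness_find_one_multiple : Int × Int × Int := (3, 5, 7)

def Spec_find_one_multiple (line : Int) (offset : Int) (first_id : Int) (out : List Int) : Prop := out = find_one_multiple_alt line offset first_id
instance (line : Int) (offset : Int) (first_id : Int) (out : List Int) : Decidable (Spec_find_one_multiple line offset first_id out) := by unfold Spec_find_one_multiple; infer_instance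

-- ===== CLAIM (what is proved, stated in full; the proofs are below) =====
def Claim_equal_find_one_multiple : Prop := ∀ (line : Int) (offset : Int) (first_id : Int), Dom_find_one_multiple line offset first_id → Pre_find_one_multiple line offset first_id → Spec_find_one_multiple line offset first_id (find_one_multiple line offset first_id)

-- ===== LEMMAS AND PROOFS =====

lemma egcd_spec : ∀ (n : Nat) (a b : Int), b.natAbs ≤ n → 0 ≤ a → 0 ≤ b →
    (egcd a b).1 = (Int.gcd a b : Int) ∧
    a * (egcd a b).2.1 + b * (egcd a b).2.2 = (Int.gcd a b : Int) := by
  intro n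
  induction n with
  | zero =>
    intro a b hn ha hb
    have hb0 : b = 0 := by omega
    subst hb0
    rw [egcd]
    simp [Int.gcd, Int.natAbs_of_nonneg ha]
  | succ n ih =>
    intro a b hn ha hb
    by_cases hb0 : b = 0
    · subst hb0
      rw [egcd]
      simp [Int.gcd, Int.natAbs_of_nonneg ha]
    · have hbpos : 0 < b := lt_of_le_of_ne hb (Ne.symm hb0)
      have hmod : PySem.Int.mod a b = a % b := PySem.Int.mod_eq_emod_of_pos hbpos
      have hdiv : PySem.Int.floordiv a b = a / b := PySem.Int.floordiv_eq_ediv_of_pos hbpos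
      have h1 : 0 ≤ a % b := Int.emod_nonneg a hb0
      have h2 : (a % b).natAbs ≤ n := by
        have := Int.emod_lt_of_pos a hbpos
        omega
      have IH := ih b (a % b) h2 hb h1
      have hgcd : Int.gcd b (a % b) = Int.gcd a b := by
        rw [Int.gcd_comm, Int.gcd_emod]
      rw [egcd, if_neg hb0]
      simp only [hmod, hdiv]
      set x' := (egcd b (a % b)).2.1 with hx'
      set y' := (egcd b (a % b)).2.2 with hy'
      refine ⟨by rw [IH.1, hgcd], ?_⟩
      have heq : a % b = a - b * (a / b) := by
        have := Int.emod_add_mul_ediv a b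
        linarith
      rw [← hgcd]
      linear_combination IH.2 - y' * heq

lemma key_facts (line offset fid g x y a b m per k0 k : Int)
    (hl : line ≠ 0) (hf : fid ≠ 0)
    (hm : m = |fid|)
    (hg : g = (Int.gcd line fid : Int))
    (ha : a = PySem.Int.mod line m) (hb : b = PySem.Int.mod offset m)
    (hbez : a * x + m * y = g)
    (hper : per = PySem.Int.floordiv m g)
    (hk0 : k0 = PySem.Int.mod (PySem.Int.floordiv b g * x) per)
    (hk : k = if k0 ≥ 1 then k0 else per)
    (hd : (Int.gcd line fid : Int) ∣ offset) :
    (1 ≤ k ∧ k ≤ per ∧ 1 ≤ per ∧ per ≤ m) ∧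
    ∀ j : Int, fid ∣ (j * line - offset) ↔ per ∣ (j - k) := by
  have hm0 : 0 < m := by rw [hm]; exact abs_pos.mpr hf
  have hg0 : 0 < g := by
    rw [hg]
    have : Int.gcd line fid ≠ 0 := by
      simp [Int.gcd_eq_zero_iff]
      intro h; exact absurd h hl
    omega
  have hgl : g ∣ line := by rw [hg]; exact Int.gcd_dvd_left line fid
  have hgf : g ∣ fid := by rw [hg]; exact Int.gcd_dvd_right line fid
  have hgm : g ∣ m := by rw [hm]; exact (dvd_abs _ _).mpr hgf
  have hmod_a : a = line % m := by rw [ha, PySem.Int.mod_eq_emod_of_pos hm0]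
  have hmod_b : b = offset % m := by rw [hb, PySem.Int.mod_eq_emod_of_pos hm0]
  have hga : g ∣ a := by
    have : a = line - m * (line / m) := by rw [hmod_a, Int.emod_def]
    rw [this]; exact dvd_sub hgl (hgm.mul_right _)
  have hgb : g ∣ b := by
    have : b = offset - m * (offset / m) := by rw [hmod_b, Int.emod_def]
    rw [this]; exact dvd_sub (hg ▸ hd) (hgm.mul_right _)
  have hperdiv : per = m / g := by rw [hper, PySem.Int.floordiv_eq_ediv_of_pos hg0]
  have hmper : g * per = m := by rw [hperdiv]; exact Int.mul_ediv_cancel' hgm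
  have hper0 : 0 < per := by nlinarith
  have hperm : per ≤ m := by nlinarith
  -- abbreviations
  set bg := PySem.Int.floordiv b g with hbgdef
  have hbg : g * bg = b := by
    rw [hbgdef, PySem.Int.floordiv_eq_ediv_of_pos hg0]; exact Int.mul_ediv_cancel' hgb
  set ag := line / g with hagdef
  have hag : g * ag = line := Int.mul_ediv_cancel' hgl
  have haga : g ∣ a := hga
  obtain ⟨aq, haq⟩ := hga   -- a = g * aq
  have hk00 : 0 ≤ k0 := by rw [hk0]; exact PySem.Int.mod_nonneg _ hper0
  have hk0lt : k0 < per := by rw [hk0]; exact PySem.Int.mod_lt _ hper0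
  have hkb : 1 ≤ k ∧ k ≤ per := by rw [hk]; split_ifs with h <;> omega
  have hpk0 : per ∣ (bg * x) - k0 := by
    have : k0 = (bg * x) % per := by rw [hk0, PySem.Int.mod_eq_emod_of_pos hper0]
    rw [this, Int.emod_def]; exact ⟨(bg * x) / per, by ring⟩
  have hpkk0 : per ∣ k - k0 := by
    rw [hk]; split_ifs with h
    · simp
    · have : k0 = 0 := by omega
      simp [this]
  -- m divides a * z whenever per divides z
  have dmap : ∀ z : Int, per ∣ z → m ∣ a * z := by
    intro z ⟨t, ht⟩
    exact ⟨aq * t, by rw [ht, haq, ← hmper]; ring⟩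
  -- m ∣ a*(bg*x) - b
  have hxb : m ∣ a * (bg * x) - b := by
    refine ⟨-(bg * y), ?_⟩
    linear_combination bg * hbez + hbg
  -- m ∣ a*k - b
  have hak : m ∣ a * k - b := by
    have h1 : m ∣ a * (k - bg * x) := dmap _ (by
      have h2 : k - bg * x = (k - k0) - (bg * x - k0) := by ring
      rw [h2]; exact dvd_sub hpkk0 hpk0)
    have : a * k - b = a * (k - bg * x) + (a * (bg * x) - b) := by ring
    rw [this]; exact dvd_add h1 hxb
  have d1 : m ∣ line - a := by
    refine ⟨line / m, ?_⟩; rw [hmod_a, Int.emod_def]; ring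
  have d2 : m ∣ offset - b := by
    refine ⟨offset / m, ?_⟩; rw [hmod_b, Int.emod_def]; ring
  have hkey : m ∣ k * line - offset := by
    have : k * line - offset = k * (line - a) + (a * k - b) - (offset - b) := by ring
    rw [this]; exact dvd_sub (dvd_add (Dvd.dvd.mul_left d1 k) hak) d2
  have habs : ∀ z : Int, fid ∣ z ↔ m ∣ z := by intro z; rw [hm]; exact (abs_dvd _ _).symm
  -- coprimality
  have hgcdlm : (Int.gcd line m : Int) = g := by
    rw [hg, hm]; congr 1; simp [Int.gcd, Int.natAbs_abs]
  have hco : IsCoprime per ag := by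
    rw [Int.isCoprime_iff_gcd_eq_one, Int.gcd_comm]
    have hpos : 0 < Int.gcd line m := by
      have : Int.gcd line m ≠ 0 := by
        simp [Int.gcd_eq_zero_iff]; intro h; exact absurd h hl
      omega
    have := Int.gcd_div_gcd_div_gcd (i := line) (j := m) hpos
    rwa [hgcdlm ,← hagdef, ← hperdiv] at this
  refine ⟨⟨hkb.1, hkb.2, hper0, hperm⟩, ?_⟩
  intro j
  rw [habs]
  constructor
  · intro hj
    have hjk : m ∣ (j - k) * line := by
      have : (j - k) * line = (j * line - offset) - (k * line - offset) := by ring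
      rw [this]; exact dvd_sub hj hkey
    have : per ∣ (j - k) * ag := by
      rcases hjk with ⟨t, ht⟩
      refine ⟨t, ?_⟩
      have hgne : g ≠ 0 := by omega
      have : g * ((j - k) * ag) = g * (per * t) := by
        rw [← mul_assoc]
        calc g * (j - k) * ag = (j - k) * (g * ag) := by ring
        _ = (j - k) * line := by rw [hag]
        _ = m * t := ht
        _ = g * per * t := by rw [← hmper]
        _ = g * (per * t) := by ring
      exact mul_left_cancel₀ hgne this
    exact hco.dvd_of_dvd_mul_right this
  · intro ⟨t, ht⟩
    have h1 : m ∣ (j - k) * line := ⟨t * ag, by rw [ht, ← hmper, ← hag]; ring⟩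
    have : j * line - offset = (j - k) * line + (k * line - offset) := by ring
    rw [this]; exact dvd_add h1 hkey


lemma loopA_skip (line offset fid : Int) (s : PySem.Set Int) (hs : PySem.Set.len s ≠ 2) :
    ∀ (n fuel : Nat) (j : Int),
    (∀ t : Nat, t < n → ¬ fid ∣ ((j + t) * line - offset)) →
    findOneLoopA line offset fid (n + fuel) (j * line) s
      = findOneLoopA line offset fid fuel ((j + n) * line) s := by
  intro n
  induction n with
  | zero => intro fuel j h; simp
  | succ n ih =>
    intro fuel j h
    have h0 : ¬ fid ∣ (j * line - offset) := by simpa using h 0 (by omega)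
    have hcond : ¬ (PySem.Int.mod (j * line - offset) fid = 0) := by
      rw [PySem.Int.mod_eq_zero_iff_dvd]; exact h0
    have hstep : n + 1 + fuel = (n + fuel) + 1 := by omega
    rw [hstep]
    rw [findOneLoopA]
    simp only [if_neg hcond, if_neg hs]
    have e0 : j * line + line = (j + 1) * line := by ring
    rw [e0]
    have hsh : ∀ t : Nat, t < n → ¬ fid ∣ ((j + 1 + t) * line - offset) := by
      intro t ht
      have h' := h (t + 1) (by omega)
      have e : (j + ((t : Int) + 1)) * line = (j + 1 + (t : Int)) * line := by ring
      rw [show ((t + 1 : Nat) : Int) = (t : Int) + 1 from by push_cast; ring, e] at h'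
      exact h'
    rw [ih fuel (j + 1) hsh]
    congr 1
    push_cast
    ring

lemma loopA_hit (line offset fid : Int) (s : PySem.Set Int) (fuel : Nat) (j : Int)
    (hdvd : fid ∣ (j * line - offset))
    (hlen : PySem.Set.len (PySem.Set.add s (j * line - offset)) ≠ 2) :
    findOneLoopA line offset fid (fuel + 1) (j * line) s
      = findOneLoopA line offset fid fuel ((j + 1) * line) (PySem.Set.add s (j * line - offset)) := by
  have hcond : PySem.Int.mod (j * line - offset) fid = 0 := by
    rw [PySem.Int.mod_eq_zero_iff_dvd]; exact hdvd
  rw [findOneLoopA]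
  simp only [if_pos hcond, if_neg hlen]
  congr 1
  ring

lemma loopA_final (line offset fid : Int) (s : PySem.Set Int) (fuel : Nat) (j : Int)
    (hdvd : fid ∣ (j * line - offset))
    (hlen : PySem.Set.len (PySem.Set.add s (j * line - offset)) = 2) :
    findOneLoopA line offset fid (fuel + 1) (j * line) s
      = [PySem.List.pyGetD (PySem.List.sorted (PySem.Set.add s (j * line - offset)) (fun x => x)) 0 0,
         PySem.List.pyGetD (PySem.List.sorted (PySem.Set.add s (j * line - offset)) (fun x => x)) 1 0
           - PySem.List.pyGetD (PySem.List.sorted (PySem.Set.add s (j * line - offset)) (fun x => x)) 0 0] := by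
  have hcond : PySem.Int.mod (j * line - offset) fid = 0 := by
    rw [PySem.Int.mod_eq_zero_iff_dvd]; exact hdvd
  rw [findOneLoopA]
  simp only [if_pos hcond, if_pos hlen]

lemma pyGetD_pair_zero (p q d : Int) : PySem.List.pyGetD [p, q] 0 d = p := rfl

lemma pyGetD_pair_one (p q d : Int) : PySem.List.pyGetD [p, q] 1 d = q := rfl

-- ===== VERDICT (by name: the statement is the Claim_ definition above) =====
theorem find_one_multiple_spec : Claim_equal_find_one_multiple := by
  unfold Claim_equal_find_one_multiple
  intro line offset fid _ hpre
  obtain ⟨hl, hf, hd⟩ := hpre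
  unfold Spec_find_one_multiple
  have hm0 : (0 : Int) < |fid| := abs_pos.mpr hf
  set m : Int := |fid| with hmdef
  set a : Int := PySem.Int.mod line m with hadef
  set b : Int := PySem.Int.mod offset m with hbdef
  have ha0 : 0 ≤ a := by rw [hadef]; exact PySem.Int.mod_nonneg _ hm0
  have hes := egcd_spec m.natAbs a m (le_refl _) ha0 (le_of_lt hm0)
  have hgcd_am : (Int.gcd a m : Int) = (Int.gcd line fid : Int) := by
    rw [hadef, PySem.Int.mod_eq_emod_of_pos hm0, Int.gcd_emod, hmdef]
    congr 1
    simp [Int.gcd, Int.natAbs_abs]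
  set g : Int := (egcd a m).1 with hgdef
  set x : Int := (egcd a m).2.1 with hxdef
  set y : Int := (egcd a m).2.2 with hydef
  have hgg : g = (Int.gcd line fid : Int) := hes.1.trans hgcd_am
  have hbez : a * x + m * y = (Int.gcd line fid : Int) := by rw [← hgcd_am]; exact hes.2
  set per : Int := PySem.Int.floordiv m g with hperdef
  set k0 : Int := PySem.Int.mod (PySem.Int.floordiv b g * x) per with hk0def
  set K : Int := if k0 ≥ 1 then k0 else per with hKdef
  have key := key_facts line offset fid (Int.gcd line fid) x y a b m per k0 K hl hf
    hmdef rfl hadef hbdef hbez (by rw [hperdef, hgg]) (by rw [hk0def, hgg]) hKdef hd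
  obtain ⟨⟨hK1, hKper, hper1, hperm⟩, hchar⟩ := key
  have halt : find_one_multiple_alt line offset fid
      = [if line > 0 then K * line - offset else K * line - offset + per * line, per * |line|] := rfl
  rw [halt]
  -- fuel bookkeeping
  have hmabs : m = (fid.natAbs : Int) := by rw [hmdef]; exact Int.abs_eq_natAbs fid
  set n1 : Nat := (K - 1).toNat with hn1
  set n2 : Nat := (per - 1).toNat with hn2
  have hKn : (n1 : Int) = K - 1 := by rw [hn1]; omega
  have hpn : (n2 : Int) = per - 1 := by rw [hn2]; omega
  set rest : Nat := 2 * fid.natAbs + 2 - (n1 + n2 + 2) with hrest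
  have hfuel : 2 * fid.natAbs + 2 = n1 + (n2 + rest + 2) := by omega
  unfold find_one_multiple
  rw [hfuel, show (PySem.Set.empty : PySem.Set Int) = ([] : List Int) from rfl]
  rw [show findOneLoopA line offset fid (n1 + (n2 + rest + 2)) line []
        = findOneLoopA line offset fid (n1 + (n2 + rest + 2)) ((1 : Int) * line) [] from by rw [one_mul]]
  -- skip to the first hit at k = K
  have hskip1 : ∀ t : Nat, t < n1 → ¬ fid ∣ (((1 : Int) + t) * line - offset) := by
    intro t ht hdv
    have hdv2 := (hchar _).mp hdv
    have h3 := dvd_neg.mpr hdv2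
    rw [neg_sub] at h3
    have hle := Int.le_of_dvd (by omega) h3
    omega
  rw [loopA_skip line offset fid [] (by simp [PySem.Set.len]) n1 (n2 + rest + 2) 1 hskip1]
  have e1 : ((1 : Int) + n1) = K := by omega
  rw [e1]
  -- first hit
  have hdvK : fid ∣ (K * line - offset) := (hchar K).mpr (by simp)
  have hne12 : K * line - offset ≠ (K + per) * line - offset := by
    have hpl : per * line ≠ 0 := mul_ne_zero (by omega) hl
    intro hEq
    apply hpl
    have : per * line = ((K + per) * line - offset) - (K * line - offset) := by ring
    rw [this, ← hEq]
    ring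
  have hadd1 : PySem.Set.add ([] : PySem.Set Int) (K * line - offset) = [K * line - offset] := by
    simp [PySem.Set.add, PySem.Set.contains]
  rw [loopA_hit line offset fid [] (n2 + rest + 1) K hdvK (by rw [hadd1]; simp [PySem.Set.len])]
  rw [hadd1]
  -- skip to the second hit at k = K + per
  have hskip2 : ∀ t : Nat, t < n2 → ¬ fid ∣ ((K + 1 + t) * line - offset) := by
    intro t ht hdv
    have hdv2 := (hchar _).mp hdv
    have hle := Int.le_of_dvd (by omega) hdv2
    omega
  rw [show n2 + rest + 1 = n2 + (rest + 1) from by omega]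
  rw [loopA_skip line offset fid [K * line - offset] (by simp [PySem.Set.len]) n2 (rest + 1) (K + 1) hskip2]
  have e2 : (K + 1 + (n2 : Int)) = K + per := by omega
  rw [e2]
  -- second hit: the set reaches two elements and A returns
  have hdvKP : fid ∣ ((K + per) * line - offset) := (hchar (K + per)).mpr ⟨1, by ring⟩
  have hcfalse : PySem.Set.contains ([K * line - offset] : PySem.Set Int) ((K + per) * line - offset) = false := by
    simp only [PySem.Set.contains, List.contains_cons, List.contains_nil, Bool.or_false,
      beq_eq_false_iff_ne, ne_eq]
    exact fun h => hne12 h.symm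
  have hadd2 : PySem.Set.add ([K * line - offset] : PySem.Set Int) ((K + per) * line - offset)
      = [K * line - offset, (K + per) * line - offset] := by
    simp [PySem.Set.add, PySem.Set.contains] at hcfalse ⊢
    simp [hcfalse]
  rw [loopA_final line offset fid [K * line - offset] rest (K + per) hdvKP
      (by rw [hadd2]; simp [PySem.Set.len])]
  rw [hadd2]
  rcases lt_trichotomy line 0 with hneg | h0 | hpos
  · -- line < 0: the later hit is the smaller value
    have hpl : per * line < 0 := mul_neg_of_pos_of_neg (by omega) hneg
    have hlt : (K + per) * line - offset < K * line - offset := by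
      have : ((K + per) * line - offset) - (K * line - offset) = per * line := by ring
      omega
    have hsort : PySem.List.sorted [K * line - offset, (K + per) * line - offset] (fun x => x)
        = [(K + per) * line - offset, K * line - offset] :=
      PySem.List.sorted_id_eq_of_perm_of_pairwise _ _ (List.Perm.swap _ _ _)
        (by simp [List.pairwise_cons]; nlinarith [hpl])
    rw [hsort, pyGetD_pair_zero, pyGetD_pair_one]
    rw [if_neg (by omega), abs_of_neg hneg]
    simp only [List.cons.injEq, and_true]
    exact ⟨by ring, by ring⟩
  · exact absurd h0 hl
  · -- line > 0: the first hit is the smaller value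
    have hpl : 0 < per * line := mul_pos (by omega) hpos
    have hlt : K * line - offset < (K + per) * line - offset := by
      have : ((K + per) * line - offset) - (K * line - offset) = per * line := by ring
      omega
    have hsort : PySem.List.sorted [K * line - offset, (K + per) * line - offset] (fun x => x)
        = [K * line - offset, (K + per) * line - offset] :=
      PySem.List.sorted_id_eq_of_perm_of_pairwise _ _ (List.Perm.refl _)
        (by simp [List.pairwise_cons]; nlinarith [hpl])
    rw [hsort, pyGetD_pair_zero, pyGetD_pair_one]
    rw [if_pos hpos, abs_of_pos hpos]
    simp only [List.cons.injEq, and_true]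
    exact ⟨trivial, by ring⟩
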